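-- pv_equiv track=rewrite | github.com/jackiepiepkorn/cse291-nytgames | nytgames/env/strands.py | _resolve_word_paths
-- ===== SOURCE A (Python) =====
-- from typing import Set, List, Tuple, Any, Dict
--
-- def _resolve_word_paths(
--     all_paths: Dict[str, List[List[Tuple[int, int]]]]
-- ) -> Dict[str, List[Tuple[int, int]]]:
--     """
--     Backtracking search for a consistent assignment of paths (no two words share a cell).
--     Returns the first valid assignment found.
--     """
--     # Most-constrained-variable first: try words with fewest paths first to maximize pruning
--     words = sorted(all_paths.keys(), key=lambda w: len(all_paths[w]))
--
--     def backtrack(idx, used_coords, assignment):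
--         if idx == len(words):
--             return dict(assignment)
--         word = words[idx]
--         for path in all_paths[word]:
--             path_coords = frozenset(path)
--             if not path_coords & used_coords:
--                 assignment[word] = path
--                 result = backtrack(idx + 1, used_coords | path_coords, assignment)
--                 if result is not None:
--                     return result
--                 del assignment[word]
--         return None
--
--     result = backtrack(0, frozenset(), {})
--     assert result is not None, "No valid path assignment found — words may not tile the board."
--     return result
-- ===== SOURCE B (Python) =====
-- from typing import List, Tuple, Dict
--
--
-- def _resolve_word_paths(
--     all_paths: Dict[str, List[List[Tuple[int, int]]]]
-- ) -> Dict[str, List[Tuple[int, int]]]: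
--     """
--     Iterative DFS with an explicit stack instead of recursion; same
--     most-constrained-first word order and path order, so it returns the
--     exact assignment the recursive search finds first.
--     """
--     words = sorted(all_paths, key=lambda w: len(all_paths[w]))
--     n = len(words)
--     if n == 0:
--         return {}
--     # frame: (next path index to try at this depth, cells used by shallower depths)
--     stack = [(0, frozenset())]
--     chosen = []  # chosen path per depth; len(chosen) == len(stack) - 1
--     while stack:
--         depth = len(stack) - 1
--         i, used = stack[-1]
--         paths = all_paths[words[depth]]
--         advanced = False
--         while i < len(paths):
--             pc = frozenset(paths[i])
--             if not pc & used:
--                 stack[-1] = (i + 1, used)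
--                 chosen.append(paths[i])
--                 if depth + 1 == n:
--                     return dict(zip(words, chosen))
--                 stack.append((0, used | pc))
--                 advanced = True
--                 break
--             i += 1
--         if not advanced:
--             stack.pop()
--             if chosen:
--                 chosen.pop()
--     raise AssertionError("No valid path assignment found — words may not tile the board.")
-- ===== Notes on version B (the rewrite author's own statement) =====
-- stated objective: alternative
-- what changed: Replaces the recursive backtracking closure (dict assignment mutated/deleted on backtrack) with an iterative DFS over an explicit stack of (next-path-index, used-cells) frames plus a chosen-paths list, returning dict(zip(words, chosen)) at the first full depth; same word and path order, so the identical first assignment is found.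
import Mathlib
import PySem

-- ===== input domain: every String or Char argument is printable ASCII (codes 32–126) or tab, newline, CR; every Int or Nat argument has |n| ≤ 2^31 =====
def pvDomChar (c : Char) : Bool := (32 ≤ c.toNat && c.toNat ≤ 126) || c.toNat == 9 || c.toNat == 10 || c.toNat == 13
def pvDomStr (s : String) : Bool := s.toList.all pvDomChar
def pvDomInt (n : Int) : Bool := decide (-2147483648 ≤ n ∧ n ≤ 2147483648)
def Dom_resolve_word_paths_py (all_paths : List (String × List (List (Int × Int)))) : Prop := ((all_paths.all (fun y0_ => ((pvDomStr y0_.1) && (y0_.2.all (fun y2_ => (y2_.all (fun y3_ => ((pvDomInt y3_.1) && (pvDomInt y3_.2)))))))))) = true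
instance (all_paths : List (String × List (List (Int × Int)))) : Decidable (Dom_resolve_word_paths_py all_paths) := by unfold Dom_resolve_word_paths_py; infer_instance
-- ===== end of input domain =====

-- B replaces A's recursive backtracking by an explicit-stack iterative DFS with the
-- same word order and path order, so it finds and returns the identical first assignment.

abbrev PvCoord : Type := Int × Int
abbrev PvPath : Type := List PvCoord

-- Python's `not frozenset(path) & used_coords` (both A and B test exactly this)
def pvDisj (p : PvPath) (used : PySem.Set PvCoord) : Bool :=
  (PySem.Set.inter (PySem.Set.ofList p) used).isEmpty

-- ===== PORT A =====
mutual
/-- `backtrack(idx, used_coords, assignment)`; `ws` is the suffix `words[idx:]`. -/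
def pvBtA (d : PySem.Dict String (List PvPath)) :
    List String → PySem.Set PvCoord → PySem.Dict String PvPath →
    Option (PySem.Dict String PvPath)
  | [], _, a => some a                         -- idx == len(words): return dict(assignment)
  | w :: rest, used, a => pvTryA d w rest (d.getD w []) used a
termination_by ws => (ws.length, 0)

/-- the `for path in all_paths[word]` loop of `backtrack` -/
def pvTryA (d : PySem.Dict String (List PvPath)) (w : String) (rest : List String) :
    List PvPath → PySem.Set PvCoord → PySem.Dict String PvPath →
    Option (PySem.Dict String PvPath)
  | [], _, _ => none
  | p :: ps, used, a =>
    if pvDisj p used then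
      match pvBtA d rest (PySem.Set.union used (PySem.Set.ofList p)) (a.insert w p) with
      | some r => some r
      | none => pvTryA d w rest ps used ((a.insert w p).erase w)   -- del assignment[word]
    else pvTryA d w rest ps used a
termination_by ps => (rest.length, ps.length + 1)
end

def resolve_word_paths_py (all_paths : List (String × List (List (Int × Int)))) :
    List (String × List (Int × Int)) :=
  let d : PySem.Dict String (List PvPath) := PySem.Dict.ofList all_paths   -- the dict argument
  let words := PySem.List.sorted d.keys (fun w => (d.getD w []).length)
  match pvBtA d words PySem.Set.empty PySem.Dict.empty with
  | some r => r.items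
  | none => []      -- Python raises AssertionError here; excluded by Pre_

-- ===== PORT B =====
/-- the inner `while i < len(paths)` scan: first non-conflicting path index ≥ i (with its path) -/
def pvScanB (used : PySem.Set PvCoord) (paths : List PvPath) (i : Nat) :
    Option (Nat × PvPath) :=
  if h : i < paths.length then
    if pvDisj paths[i] used then some (i, paths[i])
    else pvScanB used paths (i + 1)
  else none
termination_by paths.length - i

lemma pvScanB_some (used : PySem.Set PvCoord) (paths : List PvPath) :
    ∀ i j p, pvScanB used paths i = some (j, p) →
      i ≤ j ∧ j < paths.length ∧ paths[j]? = some p := by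
  intro i
  fun_induction pvScanB used paths i with
  | case1 i h hd => intro j p hs; simp at hs; obtain ⟨rfl, rfl⟩ := hs
                    exact ⟨le_refl _, h, by simp [h]⟩
  | case2 i h hd ih => intro j p hs
                       obtain ⟨h1, h2, h3⟩ := ih j p hs
                       exact ⟨by omega, h2, h3⟩
  | case3 i h => intro j p hs; simp at hs

/-- bound on every per-word path count, for the loop's termination measure -/
def pvMaxLen (d : PySem.Dict String (List PvPath)) : Nat :=
  (d.values.map List.length).foldl max 0

lemma pvGetD_length_le (d : PySem.Dict String (List PvPath)) (w : String) :
    (d.getD w []).length ≤ pvMaxLen d := by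
  rw [PySem.Dict.getD_eq_get?_getD]
  cases hg : d.get? w with
  | none => simp
  | some v =>
    have hv : v.length ∈ d.values.map List.length := by
      have := PySem.Dict.mem_items_of_get?_eq_some d hg
      simp only [PySem.Dict.values, List.map_map, List.mem_map]
      exact ⟨(w, v), this, rfl⟩
    simpa using (PySem.List.le_foldl_max (d.values.map List.length) 0).2 _ hv

/-- termination measure for the explicit-stack loop -/
def pvMu (L n : Nat) : List (Nat × PySem.Set PvCoord) → Nat
  | [] => 0
  | (i, _) :: rest => (L + 1 - i) * (L + 2) ^ (n - rest.length) + pvMu L n rest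

lemma pvMu_lt (L n i j : Nat) (rest : List (Nat × PySem.Set PvCoord))
    (u u' : PySem.Set PvCoord) (hij : i ≤ j) (hj : j ≤ L) (hd : rest.length + 1 < n) :
    pvMu L n ((0, u') :: (j + 1, u) :: rest) < pvMu L n ((i, u) :: rest) := by
  simp only [pvMu, List.length_cons]
  set B := L + 2 with hB
  have he : n - rest.length = (n - (rest.length + 1)) + 1 := by omega
  set e := n - (rest.length + 1) with hee
  rw [he]
  have hpow : 0 < B ^ e := Nat.pow_pos (by omega)
  have hLj : L + 1 - (j + 1) = L - j := by omega
  rw [hLj]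
  have h1 : (L + 1 - 0) * B ^ e < B ^ (e + 1) :=
    calc (L + 1 - 0) * B ^ e < B * B ^ e := Nat.mul_lt_mul_of_pos_right (by omega) hpow
      _ = B ^ (e + 1) := by rw [pow_succ, Nat.mul_comm]
  have h2 : ((L - j) + 1) * B ^ (e + 1) ≤ (L + 1 - i) * B ^ (e + 1) :=
    Nat.mul_le_mul_right _ (by omega)
  have h3 : ((L - j) + 1) * B ^ (e + 1) = (L - j) * B ^ (e + 1) + B ^ (e + 1) := by ring
  omega

/-- the `while stack:` loop; stack is top-first, a frame is
(next path index to try at this depth, cells used by shallower depths). -/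
def pvLoopB (d : PySem.Dict String (List PvPath)) (words : List String) :
    List (Nat × PySem.Set PvCoord) → List PvPath → Option (List PvPath)
  | [], _ => none
  | (i, used) :: rest, chosen =>
    match hscan : pvScanB used (d.getD (words.getD rest.length "") []) i with
    | some (j, p) =>
      if rest.length + 1 ≥ words.length then some (chosen ++ [p])   -- depth+1 == n (≥ only for totality)
      else pvLoopB d words
            ((0, PySem.Set.union used (PySem.Set.ofList p)) :: (j + 1, used) :: rest)
            (chosen ++ [p])
    | none => pvLoopB d words rest chosen.dropLast                  -- pop
termination_by stack _ => (pvMu (pvMaxLen d) words.length stack, stack.length)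
decreasing_by
  · apply Prod.Lex.left
    obtain ⟨h1, h2, _⟩ := pvScanB_some _ _ _ _ _ hscan
    exact pvMu_lt _ _ _ _ rest _ _ h1
      (by have := pvGetD_length_le d (words.getD rest.length ""); omega) (by omega)
  · apply Prod.Lex.right'
    · simp only [pvMu]; omega
    · simp

def resolve_word_paths_py_alt (all_paths : List (String × List (List (Int × Int)))) :
    List (String × List (Int × Int)) :=
  let d : PySem.Dict String (List PvPath) := PySem.Dict.ofList all_paths
  let words := PySem.List.sorted d.keys (fun w => (d.getD w []).length)
  if words.length = 0 then []
  else
    match pvLoopB d words [(0, PySem.Set.empty)] [] with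
    | some chosen => words.zip chosen
    | none => []    -- Python raises AssertionError here; excluded by Pre_

-- ===== PRECONDITION & SPEC =====
-- Pre_: exactly the inputs on which A returns (some choice of one path per word is
-- pairwise cell-disjoint); on the rest A raises AssertionError.
def Pre_resolve_word_paths_py (all_paths : List (String × List (List (Int × Int)))) : Prop :=
  ∃ sel ∈ ((PySem.Dict.ofList all_paths : PySem.Dict String (List PvPath)).values).sections,
    sel.Pairwise (fun p q => ∀ c ∈ p, c ∉ q)
instance (all_paths : List (String × List (List (Int × Int)))) : Decidable (Pre_resolve_word_paths_py all_paths) := by unfold Pre_resolve_word_paths_py; infer_instance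

def pvWitness_resolve_word_paths_py : (List (String × List (List (Int × Int)))) :=
  [("a", [[(0, 0)], [(1, 0)]]), ("b", [[(0, 0), (0, 1)]])]

def Spec_resolve_word_paths_py (all_paths : List (String × List (List (Int × Int)))) (out : List (String × List (Int × Int))) : Prop := out = resolve_word_paths_py_alt all_paths
instance (all_paths : List (String × List (List (Int × Int)))) (out : List (String × List (Int × Int))) : Decidable (Spec_resolve_word_paths_py all_paths out) := by unfold Spec_resolve_word_paths_py; infer_instance

-- ===== CLAIM (what is proved, stated in full; the proofs are below) =====
def Claim_equal_resolve_word_paths_py : Prop := ∀ (all_paths : List (String × List (List (Int × Int)))), Dom_resolve_word_paths_py all_paths → Pre_resolve_word_paths_py all_paths → Spec_resolve_word_paths_py all_paths (resolve_word_paths_py all_paths)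

-- ===== LEMMAS AND PROOFS =====

/-- reference search: first pairwise-consistent selection for the remaining words;
`ws` are the words after the current one, `ps` the remaining candidate paths of the
current word; returns the chosen paths for the current word and all of `ws`. -/
def pvSolFrom (d : PySem.Dict String (List PvPath)) :
    List String → List PvPath → PySem.Set PvCoord → Option (List PvPath)
  | _, [], _ => none
  | [], p :: ps, used =>
    if pvDisj p used then some [p] else pvSolFrom d [] ps used
  | w' :: ws', p :: ps, used =>
    if pvDisj p used then
      match pvSolFrom d ws' (d.getD w' []) (PySem.Set.union used (PySem.Set.ofList p)) with
      | some t => some (p :: t)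
      | none => pvSolFrom d (w' :: ws') ps used
    else pvSolFrom d (w' :: ws') ps used
termination_by ws ps => (ws.length, ps.length)

def pvSol (d : PySem.Dict String (List PvPath)) :
    List String → PySem.Set PvCoord → Option (List PvPath)
  | [], _ => some []
  | w :: ws, used => pvSolFrom d ws (d.getD w []) used

lemma pvSolFrom_cons (d : PySem.Dict String (List PvPath)) (ws : List String)
    (p : PvPath) (ps : List PvPath) (used : PySem.Set PvCoord) :
    pvSolFrom d ws (p :: ps) used =
      if pvDisj p used then
        match pvSol d ws (PySem.Set.union used (PySem.Set.ofList p)) with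
        | some t => some (p :: t)
        | none => pvSolFrom d ws ps used
      else pvSolFrom d ws ps used := by
  cases ws <;> simp [pvSolFrom, pvSol]

lemma pvSolFrom_length (d : PySem.Dict String (List PvPath)) :
    ∀ ws ps used ts, pvSolFrom d ws ps used = some ts → ts.length = ws.length + 1 := by
  intro ws ps used
  fun_induction pvSolFrom d ws ps used with
  | case1 _ _ => intro ts h; simp at h
  | case2 p ps used hd => intro ts h; injection h with h; subst h; rfl
  | case3 p ps used hd ih => intro ts h; exact ih ts h
  | case4 w' ws' p ps used hd t ht ih => intro ts h; injection h with h; subst h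
                                         simpa using ih t ht
  | case5 w' ws' p ps used hd hnone ih1 ih2 => intro ts h; exact ih2 ts h
  | case6 w' ws' p ps used hd ih => intro ts h; exact ih ts h

lemma pvSol_length (d : PySem.Dict String (List PvPath)) (ws : List String)
    (used : PySem.Set PvCoord) (ts : List PvPath) (h : pvSol d ws used = some ts) :
    ts.length = ws.length := by
  cases ws with
  | nil => simp [pvSol] at h; subst h; rfl
  | cons w ws => simpa using pvSolFrom_length d ws _ _ ts h

lemma pvErase_insert (a : PySem.Dict String PvPath) (w : String) (p : PvPath)
    (h : a.contains w = false) : (a.insert w p).erase w = a := by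
  cases a with
  | mk l =>
    have hl : ∀ kv ∈ l, (kv.1 == w) = false := by
      simpa [PySem.Dict.contains, List.any_eq_false] using h
    simp only [PySem.Dict.insert, h, Bool.false_eq_true, if_false,
      PySem.Dict.erase, List.filter_append]
    congr 1
    have h1 : List.filter (fun p => !p.1 == w) l = l :=
      List.filter_eq_self.mpr (by intro kv hkv; simp [hl kv hkv])
    have h2 : List.filter (fun q => !q.1 == w) [(w, p)] = [] := by simp
    simp [h1, h2]

lemma pvBtA_eq (d : PySem.Dict String (List PvPath)) :
    ∀ (ws : List String) (used : PySem.Set PvCoord) (a : PySem.Dict String PvPath),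
      (∀ w' ∈ ws, a.contains w' = false) → ws.Nodup →
      pvBtA d ws used a =
        (pvSol d ws used).map
          (fun ts => ((ws.zip ts).foldl (fun b wp => b.insert wp.1 wp.2) a)) := by
  intro ws
  induction ws with
  | nil => intro used a _ _; simp [pvBtA, pvSol]
  | cons w rest IH =>
    intro used a hfresh hnodup
    obtain ⟨hwrest, hnd⟩ := List.nodup_cons.mp hnodup
    have hw : a.contains w = false := hfresh w (by simp)
    have hrestfresh : ∀ w' ∈ rest, a.contains w' = false := fun w' h => hfresh w' (by simp [h])
    have hsolrw : pvSol d (w :: rest) used = pvSolFrom d rest (d.getD w []) used := rfl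
    rw [pvBtA, hsolrw]
    have inner : ∀ (ps : List PvPath) (a : PySem.Dict String PvPath),
        a.contains w = false → (∀ w' ∈ rest, a.contains w' = false) →
        pvTryA d w rest ps used a =
          (pvSolFrom d rest ps used).map
            (fun ts => (((w :: rest).zip ts).foldl (fun b wp => b.insert wp.1 wp.2) a)) := by
      intro ps
      induction ps with
      | nil => intro a _ _; cases rest <;> simp [pvTryA, pvSolFrom]
      | cons p ps ihp =>
        intro a ha hra
        rw [pvTryA, pvSolFrom_cons]
        by_cases hd : pvDisj p used
        · simp only [hd, if_true]
          have hfr : ∀ w' ∈ rest, (a.insert w p).contains w' = false := by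
            intro w' hw'
            rw [PySem.Dict.contains_insert]
            have hne : w' ≠ w := fun he => hwrest (he ▸ hw')
            simp [hne, hra w' hw']
          rw [IH (PySem.Set.union used (PySem.Set.ofList p)) (a.insert w p) hfr hnd]
          cases hsol : pvSol d rest (PySem.Set.union used (PySem.Set.ofList p)) with
          | some t => simp
          | none =>
            simp only [Option.map_none]
            rw [pvErase_insert a w p ha]
            exact ihp a ha hra
        · simp only [hd, Bool.false_eq_true, if_false]
          exact ihp a ha hra
    exact inner (d.getD w []) a hw hrestfresh

def pvSpecB (d : PySem.Dict String (List PvPath)) (words : List String) :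
    List (Nat × PySem.Set PvCoord) → List PvPath → Option (List PvPath)
  | [], _ => none
  | (i, used) :: rest, chosen =>
    match pvSolFrom d (words.drop (rest.length + 1))
            ((d.getD (words.getD rest.length "") []).drop i) used with
    | some ts => some (chosen ++ ts)
    | none => pvSpecB d words rest chosen.dropLast

lemma pvSolFrom_drop (d : PySem.Dict String (List PvPath)) (ws : List String)
    (used : PySem.Set PvCoord) (paths : List PvPath) :
    ∀ i, pvSolFrom d ws (paths.drop i) used =
      match pvScanB used paths i with
      | none => none
      | some (j, p) =>
        match pvSol d ws (PySem.Set.union used (PySem.Set.ofList p)) with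
        | some t => some (p :: t)
        | none => pvSolFrom d ws (paths.drop (j + 1)) used := by
  intro i
  fun_induction pvScanB used paths i with
  | case1 i h hd =>
    rw [List.drop_eq_getElem_cons h, pvSolFrom_cons]
    simp [hd]
  | case2 i h hd ih =>
    rw [List.drop_eq_getElem_cons h, pvSolFrom_cons]
    simp only [hd, Bool.false_eq_true, if_false]
    exact ih
  | case3 i h =>
    rw [List.drop_eq_nil_of_le (by omega)]
    cases ws <;> simp [pvSolFrom]

lemma pvLoopB_eq_spec (d : PySem.Dict String (List PvPath)) (words : List String) :
    ∀ stack chosen, stack.length ≤ words.length →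
      pvLoopB d words stack chosen = pvSpecB d words stack chosen := by
  intro stack chosen
  fun_induction pvLoopB d words stack chosen with
  | case1 chosen => intro _; rfl
  | case2 i used rest chosen j p hscan hge =>
    intro hlen
    simp only [List.length_cons] at hlen
    have hn : rest.length + 1 = words.length := le_antisymm hlen hge
    rw [pvSpecB, pvSolFrom_drop, hscan, hn, List.drop_length]
    simp [pvSol]
  | case3 i used rest chosen j p hscan hge ih =>
    intro hlen
    have hlt : rest.length + 1 < words.length := lt_of_not_ge hge
    rw [ih (by simp only [List.length_cons]; omega)]
    have hget : words.getD (rest.length + 1) "" = words[rest.length + 1] :=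
      List.getD_eq_getElem words "" hlt
    have hws : words.drop (rest.length + 1) = words[rest.length + 1] :: words.drop (rest.length + 2) :=
      List.drop_eq_getElem_cons hlt
    have hsol : pvSol d (words.drop (rest.length + 1))
        (PySem.Set.union used (PySem.Set.ofList p)) =
        pvSolFrom d (words.drop (rest.length + 2)) (d.getD words[rest.length + 1] [])
          (PySem.Set.union used (PySem.Set.ofList p)) := by
      rw [hws]; rfl
    have hL : pvSpecB d words
        ((0, PySem.Set.union used (PySem.Set.ofList p)) :: (j + 1, used) :: rest)
        (chosen ++ [p]) =
        match pvSol d (words.drop (rest.length + 1)) (PySem.Set.union used (PySem.Set.ofList p)) with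
        | some ts => some (chosen ++ [p] ++ ts)
        | none => pvSpecB d words ((j + 1, used) :: rest) chosen := by
      rw [pvSpecB, hsol]
      simp only [List.length_cons, List.drop_zero, List.dropLast_concat, hget]
    have hR : pvSpecB d words ((i, used) :: rest) chosen =
        match (match pvSol d (words.drop (rest.length + 1)) (PySem.Set.union used (PySem.Set.ofList p)) with
               | some t => some (p :: t)
               | none => pvSolFrom d (words.drop (rest.length + 1))
                   ((d.getD (words.getD rest.length "") []).drop (j + 1)) used) with
        | some ts => some (chosen ++ ts)
        | none => pvSpecB d words rest chosen.dropLast := by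
      rw [pvSpecB, pvSolFrom_drop, hscan]
    rw [hL, hR]
    cases hy : pvSol d (words.drop (rest.length + 1)) (PySem.Set.union used (PySem.Set.ofList p)) with
    | some t => simp
    | none =>
      simp only []
      rw [pvSpecB]
  | case4 i used rest chosen hscan ih =>
    intro hlen
    rw [ih (by simp only [List.length_cons] at hlen; omega)]
    rw [pvSpecB, pvSolFrom_drop, hscan]

lemma pvItems_foldl_insert :
    ∀ (ps : List (String × PvPath)) (a : PySem.Dict String PvPath),
      (∀ kv ∈ ps, a.contains kv.1 = false) → (ps.map Prod.fst).Nodup →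
      (ps.foldl (fun b wp => b.insert wp.1 wp.2) a).items = a.items ++ ps := by
  intro ps
  induction ps with
  | nil => intro a _ _; simp
  | cons kv ps ih =>
    intro a hfresh hnodup
    have hk : a.contains kv.1 = false := hfresh kv (by simp)
    have h1 : (a.insert kv.1 kv.2).items = a.items ++ [kv] :=
      PySem.Dict.items_insert_of_not_contains a kv.2 hk
    have hfresh' : ∀ kv' ∈ ps, (a.insert kv.1 kv.2).contains kv'.1 = false := by
      intro kv' hkv'
      rw [PySem.Dict.contains_insert]
      have hne : kv'.1 ≠ kv.1 := by
        have := hnodup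
        simp only [List.map_cons, List.nodup_cons, List.mem_map] at this
        exact fun he => this.1 ⟨kv', hkv', he⟩
      simp [hne, hfresh kv' (by simp [hkv'])]
    have := ih (a.insert kv.1 kv.2) hfresh' (by simpa using hnodup.of_cons)
    simp only [List.foldl_cons, this, h1, List.append_assoc, List.singleton_append]

-- ===== VERDICT (by name: the statement is the Claim_ definition above) =====
theorem resolve_word_paths_py_spec : Claim_equal_resolve_word_paths_py := by
  intro all_paths _ _
  unfold Spec_resolve_word_paths_py resolve_word_paths_py resolve_word_paths_py_alt
  simp only []
  set d : PySem.Dict String (List PvPath) := PySem.Dict.ofList all_paths with hd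
  set words := PySem.List.sorted d.keys (fun w => (d.getD w []).length) with hwordsdef
  have hnodup : words.Nodup :=
    (PySem.List.sorted_perm d.keys (fun w => (d.getD w []).length) false).nodup_iff.mpr
      (PySem.Dict.nodup_keys_ofList all_paths)
  rw [pvBtA_eq d words PySem.Set.empty PySem.Dict.empty
        (fun w' _ => PySem.Dict.contains_empty w') hnodup]
  cases hw : words with
  | nil => simp [pvSol, PySem.Dict.empty]
  | cons w0 wtail =>
    rw [if_neg (by simp)]
    rw [pvLoopB_eq_spec d (w0 :: wtail) [(0, PySem.Set.empty)] [] (by simp)]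
    rw [pvSpecB]
    simp only [List.length_nil, List.drop_zero, List.drop_succ_cons, List.getD_cons_zero,
      List.nil_append, Nat.zero_add]
    rw [show pvSolFrom d wtail (d.getD w0 []) PySem.Set.empty
          = pvSol d (w0 :: wtail) PySem.Set.empty from rfl]
    cases hsol : pvSol d (w0 :: wtail) PySem.Set.empty with
    | none => simp [pvSpecB]
    | some ts =>
      simp only [Option.map_some]
      have hnodup' : (w0 :: wtail).Nodup := hw ▸ hnodup
      have hlents : ts.length = (w0 :: wtail).length := pvSol_length d _ _ ts hsol
      have hkeys : ((w0 :: wtail).zip ts).map Prod.fst = w0 :: wtail :=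
        List.map_fst_zip (by omega)
      rw [pvItems_foldl_insert ((w0 :: wtail).zip ts) PySem.Dict.empty
            (fun kv _ => PySem.Dict.contains_empty kv.1) (by rw [hkeys]; exact hnodup')]
      simp [PySem.Dict.empty]
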